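-- pv_equiv track=rewrite | github.com/moleece/aoc_23 | 2024/michael/21/solution.py | arrowsToArrows
-- ===== SOURCE A (Python) =====
-- def arrowsToArrows(arrowString):
--     arrowPos = {
--         '^': (0,1),
--         'A': (0,2),
--         '<': (1,0),
--         'v': (1,1),
--         '>': (1,2)
--     }
--     pos = (0,2)
--     seq = ''
--     for arrow in arrowString:
--         newPos = arrowPos[arrow]
--         dy = newPos[0] - pos[0]
--         dx = newPos[1] - pos[1]
--         toAdd = []
--         if pos[0] == 0 and newPos[1] == 0:
--             sortOrder = '^v<>'
--         else:
--             sortOrder = '<>^v'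
--         if dx > 0:
--             toAdd += ['>'] * dx
--         else:
--             toAdd += ['<'] * -dx
--         if dy > 0:
--             toAdd += ['v'] * dy
--         else:
--             toAdd += ['^'] * -dy
--         toAdd = sorted(toAdd, key=lambda x: sortOrder.index(x))
--         seq += ''.join(toAdd)
--         seq += 'A'
--         pos = newPos
--     return seq
-- ===== SOURCE B (Python) =====
-- def arrowsToArrows(arrowString):
--     arrowPos = {
--         '^': (0,1),
--         'A': (0,2),
--         '<': (1,0),
--         'v': (1,1),
--         '>': (1,2)
--     }
--     def moves(a, b):
--         (py, px), (ny, nx) = arrowPos[a], arrowPos[b]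
--         horiz = '>' * (nx - px) if nx > px else '<' * (px - nx)
--         vert = 'v' * (ny - py) if ny > py else '^' * (py - ny)
--         # vertical first exactly when leaving the top row for the left column (gap guard)
--         return vert + horiz if py == 0 and nx == 0 else horiz + vert
--     table = {(a, b): moves(a, b) for a in arrowPos for b in arrowPos}
--     prev = 'A'
--     out = []
--     for arrow in arrowString:
--         out.append(table[(prev, arrow)] + 'A')
--         prev = arrow
--     return ''.join(out)
-- ===== Notes on version B (the rewrite author's own statement) =====
-- stated objective: alternative
-- what changed: B precomputes a 25-entry table of move strings for every (from,to) pad pair once (same delta/gap rule, no sort), then the main loop is a single pass doing one table lookup and an append per character instead of recomputing deltas and sorting a move list each step.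
import Mathlib
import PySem

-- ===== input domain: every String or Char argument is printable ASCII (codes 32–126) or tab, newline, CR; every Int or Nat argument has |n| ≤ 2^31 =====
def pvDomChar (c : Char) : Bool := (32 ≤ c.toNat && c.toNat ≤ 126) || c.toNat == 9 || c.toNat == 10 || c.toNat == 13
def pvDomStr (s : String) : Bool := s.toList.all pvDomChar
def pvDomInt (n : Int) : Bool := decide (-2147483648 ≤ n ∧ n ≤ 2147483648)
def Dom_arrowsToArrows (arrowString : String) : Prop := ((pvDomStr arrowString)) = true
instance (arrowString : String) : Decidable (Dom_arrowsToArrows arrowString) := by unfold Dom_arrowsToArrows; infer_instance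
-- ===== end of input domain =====

-- B replaces A's per-character delta/sort computation by a table of all 25 (from,to) move
-- strings built once with the same rule, making the main loop a single lookup pass (objective: alternative).


-- ===== PORT A =====
def pvArrowPosA : PySem.Dict Char (Int × Int) :=
  PySem.Dict.ofList [('^', (0,1)), ('A', (0,2)), ('<', (1,0)), ('v', (1,1)), ('>', (1,2))]

-- one iteration of A's loop; `none` = KeyError on an arrow not on the pad (excluded by Pre_)
def pvStepA (st : Option ((Int × Int) × List Char)) (arrow : Char) : Option ((Int × Int) × List Char) :=
  match st with
  | none => none
  | some (pos, seq) =>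
    match PySem.Dict.get? pvArrowPosA arrow with
    | none => none
    | some newPos =>
      let dy := newPos.1 - pos.1
      let dx := newPos.2 - pos.2
      let sortOrder : List Char :=
        if pos.1 = 0 ∧ newPos.2 = 0 then ['^','v','<','>'] else ['<','>','^','v']
      let toAdd : List Char :=
        (if dx > 0 then List.replicate dx.toNat '>' else List.replicate (-dx).toNat '<')
        ++ (if dy > 0 then List.replicate dy.toNat 'v' else List.replicate (-dy).toNat '^')
      -- key = sortOrder.index(x): exact here, every element of toAdd occurs in sortOrder
      let toAdd := PySem.List.sorted toAdd (fun c => ((PySem.List.index? sortOrder c).getD 0 : Nat)) false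
      some (newPos, seq ++ toAdd ++ ['A'])

def arrowsToArrows (arrowString : String) : String :=
  match arrowString.toList.foldl pvStepA (some ((0,2), [])) with
  | some (_, seq) => String.ofList seq
  | none => ""   -- unreachable under Pre_ (Python raises KeyError there)

-- ===== PORT B =====
def pvArrowPosB : PySem.Dict Char (Int × Int) :=
  PySem.Dict.ofList [('^', (0,1)), ('A', (0,2)), ('<', (1,0)), ('v', (1,1)), ('>', (1,2))]

-- moves(a, b) of Source B (total on the 5 pad keys; getD never fires on them)
def pvMovesB (a b : Char) : List Char :=
  let p := (PySem.Dict.get? pvArrowPosB a).getD (0,0)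
  let n := (PySem.Dict.get? pvArrowPosB b).getD (0,0)
  let horiz : List Char :=
    if n.2 > p.2 then List.replicate (n.2 - p.2).toNat '>' else List.replicate (p.2 - n.2).toNat '<'
  let vert : List Char :=
    if n.1 > p.1 then List.replicate (n.1 - p.1).toNat 'v' else List.replicate (p.1 - n.1).toNat '^'
  if p.1 = 0 ∧ n.2 = 0 then vert ++ horiz else horiz ++ vert

def pvTableB : PySem.Dict (Char × Char) (List Char) :=
  PySem.Dict.ofList
    (((pvArrowPosB.keys).flatMap (fun a => (pvArrowPosB.keys).map (fun b => ((a, b), pvMovesB a b)))))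

-- one iteration of B's loop; `none` = KeyError on a pair outside the table (excluded by Pre_)
def pvStepB (st : Option (Char × List (List Char))) (arrow : Char) : Option (Char × List (List Char)) :=
  match st with
  | none => none
  | some (prev, out) =>
    match PySem.Dict.get? pvTableB (prev, arrow) with
    | none => none
    | some m => some (arrow, out ++ [m ++ ['A']])

def arrowsToArrows_alt (arrowString : String) : String :=
  match arrowString.toList.foldl pvStepB (some ('A', [])) with
  | some (_, out) => String.ofList out.flatten   -- ''.join(out)
  | none => ""   -- unreachable under Pre_

-- ===== PRECONDITION & SPEC =====
-- Pre_ excludes exactly the inputs containing a character that is not one of the five pad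
-- keys, on which Python A (and B) raise KeyError.
def Pre_arrowsToArrows (arrowString : String) : Prop :=
  (arrowString.toList.all (fun c => (['^', 'A', '<', 'v', '>'] : List Char).contains c)) = true
instance (arrowString : String) : Decidable (Pre_arrowsToArrows arrowString) := by
  unfold Pre_arrowsToArrows; infer_instance

def pvWitness_arrowsToArrows : String := "<^A>vA"

def Spec_arrowsToArrows (arrowString : String) (out : String) : Prop := out = arrowsToArrows_alt arrowString
instance (arrowString : String) (out : String) : Decidable (Spec_arrowsToArrows arrowString out) := by unfold Spec_arrowsToArrows; infer_instance

-- ===== CLAIM (what is proved, stated in full; the proofs are below) =====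
def Claim_equal_arrowsToArrows : Prop := ∀ (arrowString : String), Dom_arrowsToArrows arrowString → Pre_arrowsToArrows arrowString → Spec_arrowsToArrows arrowString (arrowsToArrows arrowString)

-- ===== LEMMAS AND PROOFS =====

def pvKeys : List Char := ['^', 'A', '<', 'v', '>']

def pvPosOf (c : Char) : Int × Int := (PySem.Dict.get? pvArrowPosA c).getD (0,0)

def pvMove (p c : Char) : List Char := (PySem.Dict.get? pvTableB (p, c)).getD []

-- the per-character chunks both loops emit, as a recursive spec
def pvChunks : Char → List Char → List (List Char)
  | _, [] => []
  | prev, c :: rest => (pvMove prev c ++ ['A']) :: pvChunks c rest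

lemma pvStepA_eq (p : Char) (hp : p ∈ pvKeys) (c : Char) (hc : c ∈ pvKeys) (seq : List Char) :
    pvStepA (some (pvPosOf p, seq)) c = some (pvPosOf c, seq ++ pvMove p c ++ ['A']) := by
  fin_cases hp <;> fin_cases hc <;> rfl

lemma pvStepB_eq (p : Char) (hp : p ∈ pvKeys) (c : Char) (hc : c ∈ pvKeys) (out : List (List Char)) :
    pvStepB (some (p, out)) c = some (c, out ++ [pvMove p c ++ ['A']]) := by
  fin_cases hp <;> fin_cases hc <;> rfl

lemma pvRunA (l : List Char) (h : ∀ c ∈ l, c ∈ pvKeys) :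
    ∀ p, p ∈ pvKeys → ∀ seq : List Char,
    l.foldl pvStepA (some (pvPosOf p, seq)) =
      some (pvPosOf (l.foldl (fun _ c => c) p), seq ++ (pvChunks p l).flatten) := by
  induction l with
  | nil => intro p _ seq; simp [pvChunks]
  | cons c rest ih =>
    intro p hp seq
    have hc : c ∈ pvKeys := h c (by simp)
    have hrest : ∀ x ∈ rest, x ∈ pvKeys := fun x hx => h x (by simp [hx])
    simp only [List.foldl_cons, pvStepA_eq p hp c hc seq]
    rw [ih hrest c hc]
    simp [pvChunks, List.append_assoc]

lemma pvRunB (l : List Char) (h : ∀ c ∈ l, c ∈ pvKeys) :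
    ∀ p, p ∈ pvKeys → ∀ out : List (List Char),
    l.foldl pvStepB (some (p, out)) =
      some (l.foldl (fun _ c => c) p, out ++ pvChunks p l) := by
  induction l with
  | nil => intro p _ out; simp [pvChunks]
  | cons c rest ih =>
    intro p hp out
    have hc : c ∈ pvKeys := h c (by simp)
    have hrest : ∀ x ∈ rest, x ∈ pvKeys := fun x hx => h x (by simp [hx])
    simp only [List.foldl_cons, pvStepB_eq p hp c hc out]
    rw [ih hrest c hc]
    simp [pvChunks, List.append_assoc]

-- ===== VERDICT (by name: the statement is the Claim_ definition above) =====
theorem arrowsToArrows_spec : Claim_equal_arrowsToArrows := by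
  intro s _ hpre
  have hpre' : ∀ c ∈ s.toList, c ∈ pvKeys := by
    intro c hc
    have := List.all_eq_true.mp hpre c hc
    simpa [pvKeys] using this
  unfold Spec_arrowsToArrows arrowsToArrows arrowsToArrows_alt
  have hA : pvPosOf 'A' = ((0 : Int), (2 : Int)) := rfl
  have hkA : 'A' ∈ pvKeys := by simp [pvKeys]
  rw [show (some (((0 : Int), (2 : Int)), ([] : List Char))) = some (pvPosOf 'A', ([] : List Char)) from rfl]
  rw [pvRunA s.toList hpre' 'A' hkA []]
  rw [pvRunB s.toList hpre' 'A' hkA []]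
  simp
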